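-- pv_equiv track=rewrite | github.com/ChanChar/whiteboard | codeeval/highest_score.py | find_highest_score
-- ===== SOURCE A (Python) =====
-- def find_highest_score(test):
--     rows = [[int(num) for num in row.split()] for row in test.split('|')]
--     maxes = []
--     for i in range(len(rows[0])):
--         _max = None
--         for j in range(len(rows)):
--             if _max is None:
--                 _max = rows[j][i]
--             elif rows[j][i] > _max:
--                 _max = rows[j][i]
--
--         maxes.append(str(_max))
--
--     return " ".join(maxes)
-- ===== SOURCE B (Python) =====
-- def find_highest_score(test):
--     maxes = None
--     for row in test.split('|'):
--         nums = [int(t) for t in row.split()]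
--         if maxes is None:
--             maxes = nums
--         else:
--             maxes = [a if a >= b else b for a, b in zip(maxes, nums)]
--     return " ".join(map(str, maxes))
-- ===== Notes on version B (the rewrite author's own statement) =====
-- stated objective: simpler
-- what changed: Replaced the column-major nested index loops (outer over column indices, inner None-seeded scan down each column) with a single row-major pass that folds each row into a running maxima vector by elementwise max, eliminating index arithmetic and the materialised matrix.
import Mathlib
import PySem

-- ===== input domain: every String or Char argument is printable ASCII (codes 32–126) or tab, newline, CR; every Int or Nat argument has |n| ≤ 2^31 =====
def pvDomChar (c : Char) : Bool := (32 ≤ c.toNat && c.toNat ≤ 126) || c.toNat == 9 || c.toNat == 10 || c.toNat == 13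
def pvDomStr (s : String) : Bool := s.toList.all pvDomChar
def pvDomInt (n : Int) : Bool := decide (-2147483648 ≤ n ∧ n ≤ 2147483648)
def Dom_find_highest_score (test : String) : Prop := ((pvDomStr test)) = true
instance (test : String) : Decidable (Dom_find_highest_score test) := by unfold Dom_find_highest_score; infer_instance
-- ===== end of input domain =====

-- B replaces A's column-major nested index loops by a single row-major pass that folds each
-- row into a running maxima vector by elementwise max: simpler, no index arithmetic.

-- ===== PORT A =====
def find_highest_score (test : String) : String :=
  let rows : List (List Int) :=
    ((PySem.Str.split? test "|").getD []).map (fun row =>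
      (PySem.Str.split₀ row).map (fun num => (PySem.Int.ofStr? num).getD 0))
  let maxes : List String :=
    (PySem.List.pyRange 0 ((PySem.List.pyGetD rows 0 []).length : Int) 1).foldl (fun maxes i =>
      let m : Option Int :=
        (PySem.List.pyRange 0 (rows.length : Int) 1).foldl (fun mx j =>
          match mx with
          | none => some (PySem.List.pyGetD (PySem.List.pyGetD rows j []) i 0)
          | some m =>
            if PySem.List.pyGetD (PySem.List.pyGetD rows j []) i 0 > m then
              some (PySem.List.pyGetD (PySem.List.pyGetD rows j []) i 0)
            else some m) none
      maxes ++ [PySem.Int.toStr (m.getD 0)]) []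
  PySem.Str.join " " maxes

-- ===== PORT B =====
-- one row folded into the running maxima vector: [a if a >= b else b for a, b in zip(maxes, nums)]
def pvStep (maxes nums : List Int) : List Int :=
  (maxes.zip nums).map (fun p => if p.1 ≥ p.2 then p.1 else p.2)

def find_highest_score_alt (test : String) : String :=
  let maxes : Option (List Int) :=
    ((PySem.Str.split? test "|").getD []).foldl (fun maxes row =>
      let nums : List Int := (PySem.Str.split₀ row).map (fun t => (PySem.Int.ofStr? t).getD 0)
      match maxes with
      | none => some nums
      | some m => some (pvStep m nums)) none
  PySem.Str.join " " ((maxes.getD []).map PySem.Int.toStr)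

-- ===== PRECONDITION & SPEC =====
-- Pre_ excludes exactly the inputs where Python A raises: a token that is not a valid int
-- literal (ValueError) or a row shorter than the first row (IndexError on rows[j][i]).
def Pre_find_highest_score (test : String) : Prop :=
  let toks : List (List String) :=
    ((PySem.Str.split? test "|").getD []).map (fun row => PySem.Str.split₀ row)
  (∀ r ∈ toks, ∀ num ∈ r, (PySem.Int.ofStr? num).isSome = true) ∧
  (∀ r ∈ toks, (toks.headD []).length ≤ r.length)
instance (test : String) : Decidable (Pre_find_highest_score test) := by
  unfold Pre_find_highest_score; infer_instance

def pvWitness_find_highest_score : String := "72 64 150|23 11 111|81 9 85"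

def Spec_find_highest_score (test : String) (out : String) : Prop := out = find_highest_score_alt test
instance (test : String) (out : String) : Decidable (Spec_find_highest_score test out) := by unfold Spec_find_highest_score; infer_instance

-- ===== CLAIM (what is proved, stated in full; the proofs are below) =====
def Claim_equal_find_highest_score : Prop := ∀ (test : String), Dom_find_highest_score test → Pre_find_highest_score test → Spec_find_highest_score test (find_highest_score test)

-- ===== LEMMAS AND PROOFS =====

-- the inner j-loop over a column, seeded with `some m`, is a running max
theorem pvFoldOptMax (k : Nat) (rs : List (List Int)) (m : Int) :
    rs.foldl (fun mx row =>
        match mx with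
        | none => some (row.getD k 0)
        | some m => if row.getD k 0 > m then some (row.getD k 0) else some m) (some m)
      = some ((rs.map (fun s => s.getD k 0)).foldl max m) := by
  induction rs generalizing m with
  | nil => rfl
  | cons s t ih =>
    have hstep : (if s.getD k 0 > m then some (s.getD k 0) else (some m : Option Int))
        = some (max m (s.getD k 0)) := by
      split_ifs with h
      · rw [max_eq_right (le_of_lt h)]
      · rw [max_eq_left (le_of_not_gt h)]
    simp only [List.foldl_cons, List.map_cons]
    show List.foldl _ (if s.getD k 0 > m then some (s.getD k 0) else some m) t = _
    rw [hstep, ih]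

-- B's Option wrapper over the non-first rows is the plain fold of pvStep
theorem pvFoldSome (rs : List (List Int)) (m : List Int) :
    rs.foldl (fun mx nums =>
        match mx with
        | none => some nums
        | some m => some (pvStep m nums)) (some m)
      = some (rs.foldl pvStep m) := by
  induction rs generalizing m with
  | nil => rfl
  | cons s t ih => simp only [List.foldl_cons]; exact ih (pvStep m s)

-- B's row-major fold computes, entrywise, the running column maxima
theorem pvFoldRows (rs : List (List Int)) (m : List Int)
    (H : ∀ s ∈ rs, m.length ≤ s.length) :
    rs.foldl pvStep m
      = (List.range m.length).map (fun k => (rs.map (fun s => s.getD k 0)).foldl max (m.getD k 0)) := by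
  induction rs generalizing m with
  | nil =>
    apply List.ext_getElem
    · simp
    · intro k h1 h2
      simp only [List.foldl_nil] at h1 ⊢
      simp only [List.getElem_map, List.getElem_range, List.map_nil]
      rw [List.getD_eq_getElem _ _ h1]
      rfl
  | cons s t ih =>
    have hs : m.length ≤ s.length := H s (by simp)
    have hlen : (pvStep m s).length = m.length := by
      simp [pvStep, List.length_zip, Nat.min_eq_left hs]
    have ht : ∀ u ∈ t, (pvStep m s).length ≤ u.length := by
      intro u hu; rw [hlen]; exact H u (by simp [hu])
    simp only [List.foldl_cons]
    rw [ih (pvStep m s) ht, hlen]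
    apply List.map_congr_left
    intro k hk
    have hk' : k < m.length := List.mem_range.mp hk
    have hk2 : k < (pvStep m s).length := by rw [hlen]; exact hk'
    have hz : k < (m.zip s).length := by
      simpa [List.length_zip, Nat.min_eq_left hs] using hk'
    have hgs : (pvStep m s).getD k 0 = max (m.getD k 0) (s.getD k 0) := by
      rw [List.getD_eq_getElem _ _ hk2, List.getD_eq_getElem _ _ hk',
          List.getD_eq_getElem _ _ (lt_of_lt_of_le hk' hs)]
      simp only [pvStep, List.getElem_map, List.getElem_zip]
      split_ifs with h
      · exact (max_eq_left h).symm
      · exact (max_eq_right (le_of_not_ge h)).symm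
    simp only [List.map_cons, List.foldl_cons, hgs]

-- core equality, stated over the parsed matrix
theorem pvMain (rows : List (List Int))
    (H : ∀ s ∈ rows, (rows.headD []).length ≤ s.length) :
    PySem.Str.join " "
      ((PySem.List.pyRange 0 ((PySem.List.pyGetD rows 0 []).length : Int) 1).foldl (fun maxes i =>
        let m : Option Int :=
          (PySem.List.pyRange 0 (rows.length : Int) 1).foldl (fun mx j =>
            match mx with
            | none => some (PySem.List.pyGetD (PySem.List.pyGetD rows j []) i 0)
            | some m =>
              if PySem.List.pyGetD (PySem.List.pyGetD rows j []) i 0 > m then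
                some (PySem.List.pyGetD (PySem.List.pyGetD rows j []) i 0)
              else some m) none
        maxes ++ [PySem.Int.toStr (m.getD 0)]) [])
      = PySem.Str.join " "
          (((rows.foldl (fun mx nums =>
              match mx with
              | none => some nums
              | some m => some (pvStep m nums)) none).getD []).map PySem.Int.toStr) := by
  cases rows with
  | nil => rfl
  | cons r rs =>
    have H' : ∀ s ∈ rs, r.length ≤ s.length := by
      intro s hs; exact H s (by simp [hs])
    congr 1
    -- B side
    rw [List.foldl_cons]
    show _ = ((rs.foldl (fun mx nums =>
        match mx with
        | none => some nums
        | some m => some (pvStep m nums)) (some r)).getD []).map PySem.Int.toStr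
    rw [pvFoldSome, Option.getD_some, pvFoldRows rs r H']
    -- A side
    rw [PySem.List.foldl_append_singleton_eq_map
      (fun i => PySem.Int.toStr
        (((PySem.List.pyRange 0 ((r :: rs).length : Int) 1).foldl (fun mx j =>
            match mx with
            | none => some (PySem.List.pyGetD (PySem.List.pyGetD (r :: rs) j []) i 0)
            | some m =>
              if PySem.List.pyGetD (PySem.List.pyGetD (r :: rs) j []) i 0 > m then
                some (PySem.List.pyGetD (PySem.List.pyGetD (r :: rs) j []) i 0)
              else some m) none).getD 0))]
    simp only [PySem.List.pyGetD_zero_cons, List.nil_append]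
    rw [PySem.List.pyRange_zero_natCast r.length]
    simp only [List.map_map]
    apply List.map_congr_left
    intro k _
    simp only [Function.comp]
    rw [PySem.List.foldl_pyRange_zero_pyGetD' (r :: rs) []
      (fun mx row =>
        match mx with
        | none => some (PySem.List.pyGetD row ((k : Nat) : Int) 0)
        | some m =>
          if PySem.List.pyGetD row ((k : Nat) : Int) 0 > m then
            some (PySem.List.pyGetD row ((k : Nat) : Int) 0)
          else some m) none]
    rw [List.foldl_cons]
    simp only [PySem.List.pyGetD_natCast, pvFoldOptMax k rs, Option.getD_some]

-- ===== VERDICT (by name: the statement is the Claim_ definition above) =====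
theorem find_highest_score_spec : Claim_equal_find_highest_score := by
  intro test _ hpre
  unfold Spec_find_highest_score find_highest_score find_highest_score_alt
  refine Eq.trans (pvMain (((PySem.Str.split? test "|").getD []).map (fun row =>
    (PySem.Str.split₀ row).map (fun num => (PySem.Int.ofStr? num).getD 0))) ?_) ?_
  case refine_2 => rw [List.foldl_map]
  obtain ⟨_, hlen⟩ := hpre
  intro s hs
  obtain ⟨row, hrow, rfl⟩ := List.mem_map.mp hs
  have h1 := hlen _ (List.mem_map_of_mem (f := fun r => PySem.Str.split₀ r) hrow)
  simp only [List.length_map]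
  cases hsp : ((PySem.Str.split? test "|").getD []) with
  | nil => rw [hsp] at hrow; simp at hrow
  | cons a l =>
    rw [hsp] at h1
    simpa using h1
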